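-- pv_equiv track=rewrite | github.com/ozanyetkin/atb-course-2 | example_20.py | consecutive_repeat
-- ===== SOURCE A (Python) =====
-- def consecutive_repeat(input_str):
--     previous_str = ""
--     repetition_counts = []
--     repetitive_strs = []
--     for current_str in input_str:
--         if current_str == previous_str:
--             str_count += 1
--             str_slice += current_str
--         else:
--             str_count = 1
--             str_slice = current_str
--         repetition_counts.append(str_count)
--         repetitive_strs.append(str_slice)
--         previous_str = current_str
--         max_index = repetition_counts.index(max(repetition_counts))
--     return (max(repetition_counts), repetitive_strs[max_index][0])
-- ===== SOURCE B (Python) =====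
-- def consecutive_repeat(input_str):
--     best_count = 0
--     best_char = ""
--     cur_count = 0
--     prev = None
--     for ch in input_str:
--         if ch == prev:
--             cur_count += 1
--         else:
--             cur_count = 1
--             prev = ch
--         if cur_count > best_count:
--             best_count = cur_count
--             best_char = ch
--     return (best_count, best_char)
-- ===== Notes on version B (the rewrite author's own statement) =====
-- stated objective: faster
-- what changed: A appends a running count and a growing run-string to two per-position lists and rescans them with max()/list.index() on every iteration; B is a single pass keeping only the current run length and the first-seen best run length/character, no lists at all.
-- crash fix: On the empty string A raises ValueError (max() of an empty list); B returns (0, ''). — e.g. on consecutive_repeat(""): A raises ValueError, B returns (0, "")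
import Mathlib
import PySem

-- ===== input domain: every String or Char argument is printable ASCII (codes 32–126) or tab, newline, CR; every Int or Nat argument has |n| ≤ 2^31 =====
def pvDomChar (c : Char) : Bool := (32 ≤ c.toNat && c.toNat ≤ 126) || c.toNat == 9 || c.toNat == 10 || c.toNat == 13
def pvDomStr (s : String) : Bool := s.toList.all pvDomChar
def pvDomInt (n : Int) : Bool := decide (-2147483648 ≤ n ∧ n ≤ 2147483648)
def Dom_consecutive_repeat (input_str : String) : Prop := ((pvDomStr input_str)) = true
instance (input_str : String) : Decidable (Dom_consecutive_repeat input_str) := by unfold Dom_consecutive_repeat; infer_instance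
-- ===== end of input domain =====

-- B replaces A's quadratic rebuild of per-position run lists (and per-iteration max/index scans)
-- with a single pass keeping only the current run and the first-seen best run; equal return values.

-- ===== PORT A =====
-- Python strings in the loop state (previous_str, str_slice, the elements of repetitive_strs)
-- are ported as their character lists (exact: concatenation/indexing/equality coincide).
-- The loop of A: state = (previous_str, repetition_counts, repetitive_strs, str_count, str_slice, max_index).
def crLoopA : List Char → List Char → List Int → List (List Char) → Int → List Char → Nat →
    (List Char × List Int × List (List Char) × Int × List Char × Nat)
  | [], prev, counts, strs, cnt, slice, mi => (prev, counts, strs, cnt, slice, mi)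
  | c :: rest, prev, counts, strs, cnt, slice, _mi =>
      let cnt' := if [c] = prev then cnt + 1 else (1 : Int)
      let slice' := if [c] = prev then slice ++ [c] else [c]
      let counts' := counts ++ [cnt']
      let strs' := strs ++ [slice']
      -- max_index = repetition_counts.index(max(repetition_counts)); counts' is nonempty, so
      -- max?/index? are some and the getD defaults are never used.
      let m := (PySem.List.max? counts' (fun y => y)).getD 0
      let mi' := (PySem.List.index? counts' m).getD 0
      crLoopA rest [c] counts' strs' cnt' slice' mi'

def consecutive_repeat (input_str : String) : Int × String :=
  let st := crLoopA input_str.toList [] [] [] 0 [] 0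
  let counts := st.2.1
  let strs := st.2.2.1
  let mi := st.2.2.2.2.2
  -- return (max(repetition_counts), repetitive_strs[max_index][0]); the indexings raise only
  -- when input_str is empty, which Pre_ excludes, so the getD defaults are never used.
  ((PySem.List.max? counts (fun y => y)).getD 0,
   (((PySem.List.pyGet? strs (mi : Int)).getD []).head?.map (fun c => String.ofList [c])).getD "")

-- ===== PORT B =====
def crLoopB : List Char → Option Char → Int → Int → String → Int × String
  | [], _, _, bn, bc => (bn, bc)
  | c :: rest, prev, cn, bn, bc =>
      let cn' := if some c = prev then cn + 1 else (1 : Int)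
      let prev' := if some c = prev then prev else some c
      if cn' > bn then crLoopB rest prev' cn' cn' (String.ofList [c])
      else crLoopB rest prev' cn' bn bc

def consecutive_repeat_alt (input_str : String) : Int × String :=
  crLoopB input_str.toList none 0 0 ""

-- ===== PRECONDITION & SPEC =====
-- A raises ValueError (max of empty list) on the empty string; Pre_ excludes exactly that input.
def Pre_consecutive_repeat (input_str : String) : Prop := input_str.toList ≠ []
instance (input_str : String) : Decidable (Pre_consecutive_repeat input_str) := by
  unfold Pre_consecutive_repeat; infer_instance
def pvWitness_consecutive_repeat : String := "aabbba"

-- A raises ValueError on the empty string; B returns (0, "") there.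
def Raises_consecutive_repeat (input_str : String) : Prop := input_str.toList = []
instance (input_str : String) : Decidable (Raises_consecutive_repeat input_str) := by
  unfold Raises_consecutive_repeat; infer_instance
def pvRaiseWitness_consecutive_repeat : String := ""
def pvRaiseWitnessOut_consecutive_repeat : Int × String := (0, "")

def Spec_consecutive_repeat (input_str : String) (out : Int × String) : Prop :=
  out = consecutive_repeat_alt input_str
instance (input_str : String) (out : Int × String) : Decidable (Spec_consecutive_repeat input_str out) := by
  unfold Spec_consecutive_repeat; infer_instance

-- ===== CLAIM (what is proved, stated in full; the proofs are below) =====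
def Claim_equal_consecutive_repeat : Prop := ∀ (input_str : String),
  Dom_consecutive_repeat input_str → Pre_consecutive_repeat input_str →
  Spec_consecutive_repeat input_str (consecutive_repeat input_str)
def Claim_raises_consecutive_repeat : Prop :=
  (∀ (input_str : String), Dom_consecutive_repeat input_str →
      Raises_consecutive_repeat input_str → ¬ Pre_consecutive_repeat input_str) ∧
  (Dom_consecutive_repeat (pvRaiseWitness_consecutive_repeat) ∧
   Raises_consecutive_repeat (pvRaiseWitness_consecutive_repeat) ∧
   consecutive_repeat_alt (pvRaiseWitness_consecutive_repeat) = pvRaiseWitnessOut_consecutive_repeat)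

-- ===== LEMMAS AND PROOFS =====

/-- The invariant linking A's loop state to B's loop state. -/
def CRInv (prev : List Char) (counts : List Int) (strs : List (List Char)) (cnt : Int)
    (slice : List Char) (mi : Nat) (cc : Char) (cn bn : Int) (bc : String) : Prop :=
  prev = [cc] ∧ cnt = cn ∧ slice.head? = some cc ∧ counts.length = strs.length ∧
  1 ≤ bn ∧ (∀ x ∈ counts, x ≤ bn) ∧
  PySem.List.index? counts bn = some mi ∧
  (strs[mi]?.bind List.head?).map (fun c => String.ofList [c]) = some bc

lemma max?_id_of_mem_of_le {l : List Int} {bn : Int} (hmem : bn ∈ l)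
    (hle : ∀ x ∈ l, x ≤ bn) : PySem.List.max? l (fun y => y) = some bn := by
  cases hm : PySem.List.max? l (fun y => y) with
  | none =>
      rw [PySem.List.max?_eq_none_iff] at hm
      subst hm; cases hmem
  | some m =>
      have h1 := PySem.List.max?_isMax hm bn hmem
      have h2 := hle m (PySem.List.max?_mem hm)
      have h1' : bn ≤ m := h1
      rw [le_antisymm h2 h1']

lemma max?_id_append_singleton {l : List Int} {bn : Int} (x : Int)
    (h : PySem.List.max? l (fun y => y) = some bn) :
    PySem.List.max? (l ++ [x]) (fun y => y) = some (max bn x) := by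
  cases l with
  | nil => rw [(PySem.List.max?_eq_none_iff _ _).mpr rfl] at h; cases h
  | cons a t =>
      rw [PySem.List.max?_id_cons] at h
      rw [List.cons_append, PySem.List.max?_id_cons, List.foldl_append]
      simp only [List.foldl_cons, List.foldl_nil]
      rw [Option.some.inj h]

/-- Main invariant lemma: from related states, A's extraction equals B's loop result. -/
lemma loop_eq (rest : List Char) : ∀ (prev : List Char) (counts : List Int)
    (strs : List (List Char)) (cnt : Int) (slice : List Char) (mi : Nat)
    (cc : Char) (cn bn : Int) (bc : String),
    CRInv prev counts strs cnt slice mi cc cn bn bc →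
    (let st := crLoopA rest prev counts strs cnt slice mi
     ((PySem.List.max? st.2.1 (fun y => y)).getD 0,
      (((PySem.List.pyGet? st.2.2.1 ((st.2.2.2.2.2 : Nat) : Int)).getD []).head?.map
        (fun c => String.ofList [c])).getD ""))
      = crLoopB rest (some cc) cn bn bc := by
  induction rest with
  | nil =>
      intro prev counts strs cnt slice mi cc cn bn bc hInv
      obtain ⟨hprev, hcnt, hslice, hlen, hbn1, hle, hidx, hbc⟩ := hInv
      have hmem : bn ∈ counts := (PySem.List.index?_isSome_iff _ _).mp (by rw [hidx]; rfl)
      have hmax := max?_id_of_mem_of_le hmem hle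
      simp only [crLoopA, crLoopB, hmax, Option.getD_some, PySem.List.pyGet?_natCast]
      cases hg : strs[mi]? with
      | none => rw [hg] at hbc; simp at hbc
      | some l =>
          rw [hg] at hbc
          simp only [Option.bind_some] at hbc
          cases hh : l.head? with
          | none => rw [hh] at hbc; simp at hbc
          | some c =>
              rw [hh] at hbc
              simp only [Option.map_some, Option.some.injEq] at hbc
              simp [hh, hbc]
  | cons c rest ih =>
      intro prev counts strs cnt slice mi cc cn bn bc hInv
      obtain ⟨hprev, hcnt, hslice, hlen, hbn1, hle, hidx, hbc⟩ := hInv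
      have hmem : bn ∈ counts := (PySem.List.index?_isSome_iff _ _).mp (by rw [hidx]; rfl)
      have hmiLt : mi < counts.length := (PySem.List.getElem_of_index?_eq_some hidx).1
      have hmax := max?_id_of_mem_of_le hmem hle
      by_cases hc : c = cc
      · -- same character as the previous one
        subst hc
        have hEqA : ([c] = prev) = True := by simp [hprev]
        have hs' : (slice ++ [c]).head? = some c := by
          cases slice with
          | nil => simp at hslice
          | cons a t => simp at hslice ⊢; exact hslice
        by_cases hgt : cn + 1 > bn
        · -- new best run
          have hnotin : (cn + 1) ∉ counts := fun h => by have := hle _ h; omega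
          have hmax' := max?_id_append_singleton (cn + 1) hmax
          have hmaxv : max bn (cn + 1) = cn + 1 := by omega
          have hidx' := PySem.List.index?_append_singleton_self counts _ hnotin
          have hle' : ∀ x ∈ counts ++ [cn + 1], x ≤ cn + 1 := by
            intro x hx
            rcases List.mem_append.mp hx with h | h
            · have := hle _ h; omega
            · simp at h; omega
          have hbc' : Option.map (fun c => String.ofList [c])
              ((strs ++ [slice ++ [c]])[strs.length]?.bind List.head?)
              = some (String.ofList [c]) := by
            rw [List.getElem?_append_right (le_refl _)]
            simp only [Nat.sub_self, List.getElem?_cons_zero, Option.bind_some, hs',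
              Option.map_some]
          simp only [crLoopA, crLoopB, hprev, hcnt, if_true, hgt]
          exact ih _ _ _ _ _ _ c (cn + 1) (cn + 1) (String.ofList [c])
            ⟨rfl, rfl, hs', by simp [hlen], by omega, hle',
             by simp only [hmax', Option.getD_some, hmaxv, hidx'],
             by simp only [hmax', Option.getD_some, hmaxv, hidx', hlen]; exact hbc'⟩
        · -- current run does not beat the best
          have hmax' := max?_id_append_singleton (cn + 1) hmax
          have hmaxv : max bn (cn + 1) = bn := by omega
          have hidx' := PySem.List.index?_append_of_mem [cn + 1] hmem
          have hle' : ∀ x ∈ counts ++ [cn + 1], x ≤ bn := by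
            intro x hx
            rcases List.mem_append.mp hx with h | h
            · exact hle _ h
            · simp at h; omega
          have hbc' : Option.map (fun c => String.ofList [c])
              ((strs ++ [slice ++ [c]])[mi]?.bind List.head?) = some bc := by
            rw [List.getElem?_append_left (hlen ▸ hmiLt)]
            exact hbc
          simp only [crLoopA, crLoopB, hprev, hcnt, if_true, hgt]
          exact ih _ _ _ _ _ _ c (cn + 1) bn bc
            ⟨rfl, rfl, hs', by simp [hlen], hbn1, hle',
             by simp only [hmax', Option.getD_some, hmaxv, hidx', hidx, Option.getD_some],
             by simp only [hmax', Option.getD_some, hmaxv, hidx', hidx, Option.getD_some];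
                exact hbc'⟩
      · -- a different character starts a new run of length 1
        have hEqA : ¬ ([c] = prev) := by simp [hprev, hc]
        have hEqB : ¬ (some c = some cc) := by simp [hc]
        have hgt : ¬ ((1 : Int) > bn) := by omega
        have hmax' := max?_id_append_singleton 1 hmax
        have hmaxv : max bn (1 : Int) = bn := by omega
        have hidx' := PySem.List.index?_append_of_mem [(1 : Int)] hmem
        have hle' : ∀ x ∈ counts ++ [(1 : Int)], x ≤ bn := by
          intro x hx
          rcases List.mem_append.mp hx with h | h
          · exact hle _ h
          · simp at h; omega
        have hbc' : Option.map (fun c => String.ofList [c])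
            ((strs ++ [[c]])[mi]?.bind List.head?) = some bc := by
          rw [List.getElem?_append_left (hlen ▸ hmiLt)]
          exact hbc
        simp only [crLoopA, crLoopB, if_neg hEqA, if_neg hEqB, hgt]
        exact ih _ _ _ _ _ _ c 1 bn bc
          ⟨rfl, rfl, by simp, by simp [hlen], hbn1, hle',
           by simp only [hmax', Option.getD_some, hmaxv, hidx', hidx, Option.getD_some],
           by simp only [hmax', Option.getD_some, hmaxv, hidx', hidx, Option.getD_some];
              exact hbc'⟩

-- ===== VERDICT (by name: the statement is the Claim_ definition above) =====
theorem consecutive_repeat_spec : Claim_equal_consecutive_repeat := by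
  intro s _ hpre
  unfold Spec_consecutive_repeat consecutive_repeat consecutive_repeat_alt
  cases hs : s.toList with
  | nil =>
      exact absurd hs hpre
  | cons c rest =>
      -- first iteration of both loops, then the invariant lemma
      have h1 : ¬ ([c] = ([] : List Char)) := by simp
      have h2 : ¬ (some c = (none : Option Char)) := by simp
      have h3 : ((1 : Int) > 0) := by omega
      simp only [crLoopA, crLoopB, if_neg h1, if_neg h2, if_pos h3, List.nil_append]
      exact loop_eq rest [c] [1] [[c]] 1 [c] 0 c 1 1 (String.ofList [c])
        ⟨rfl, rfl, rfl, rfl, le_refl 1, by simp, by rw [PySem.List.index?_cons_self], by simp⟩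

theorem consecutive_repeat_raises : Claim_raises_consecutive_repeat := by
  unfold Claim_raises_consecutive_repeat
  exact ⟨fun s _ hr hp => hp hr, by decide⟩

/-- Witness self-check: B's port really returns the stated value where A raises. -/
theorem pvRaiseWitness_ok :
    consecutive_repeat_alt pvRaiseWitness_consecutive_repeat = pvRaiseWitnessOut_consecutive_repeat :=
  consecutive_repeat_raises.2.2.2
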